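-- pv_equiv track=rewrite | github.com/muhapauka-rgb/Rent-V7 | telegram-bot/bot.py | _choose_meter_index_from_missing
-- ===== SOURCE A (Python) =====
-- from typing import Optional, Dict, Any, List, Tuple
--
-- def _choose_meter_index_from_missing(missing: List[str]) -> int:
--     # Приоритет: электро T1/T2/T3 (первый недостающий), иначе 1
--     if not missing:
--         return 1
--     candidates = []
--     for m in missing:
--         mm = str(m).lower()
--         if "electric" in mm:
--             # electric_2 / electric_t2 / electric2
--             if ("_1" in mm) or ("t1" in mm) or mm.endswith("1"):
--                 candidates.append(1)
--             if ("_2" in mm) or ("t2" in mm) or mm.endswith("2"):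
--                 candidates.append(2)
--             if ("_3" in mm) or ("t3" in mm) or mm.endswith("3"):
--                 candidates.append(3)
--     if candidates:
--         return max(1, min(3, min(candidates)))
--     return 1
-- ===== SOURCE B (Python) =====
-- def _choose_meter_index_from_missing(missing):
--     # Priority-ordered search: try tier 1, then 2, then 3; return the first tier
--     # whose markers appear in some electric missing field; default 1.
--     for tier, under, tmark, suffix in ((1, "_1", "t1", "1"), (2, "_2", "t2", "2"), (3, "_3", "t3", "3")):
--         for m in missing:
--             mm = str(m).lower()
--             if "electric" in mm and (under in mm or tmark in mm or mm.endswith(suffix)):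
--                 return tier
--     return 1
-- ===== Notes on version B (the rewrite author's own statement) =====
-- stated objective: alternative
-- what changed: Replaces the collect-all-candidates-then-min pass with a priority-ordered nested search: for each tier 1,2,3 in order, scan the fields for that tier's markers and return the first tier that matches, so no candidate list and no min/clamp are ever built.
import Mathlib
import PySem

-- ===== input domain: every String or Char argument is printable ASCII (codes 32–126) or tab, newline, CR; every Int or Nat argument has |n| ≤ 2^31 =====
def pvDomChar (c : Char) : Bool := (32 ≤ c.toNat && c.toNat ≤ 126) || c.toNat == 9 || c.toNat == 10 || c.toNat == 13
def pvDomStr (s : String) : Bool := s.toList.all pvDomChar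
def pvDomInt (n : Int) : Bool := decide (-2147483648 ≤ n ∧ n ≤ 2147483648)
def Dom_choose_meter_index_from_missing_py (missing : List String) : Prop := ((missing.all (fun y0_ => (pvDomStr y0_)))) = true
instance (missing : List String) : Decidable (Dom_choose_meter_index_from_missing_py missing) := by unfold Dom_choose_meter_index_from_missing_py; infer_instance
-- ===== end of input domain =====

-- B replaces A's collect-candidates-then-min pass with a priority-ordered nested search (same O(n) cost).


-- ===== PORT A =====
def choose_meter_index_from_missing_py (missing : List String) : Int :=
  if missing = [] then 1
  else
    let candidates : List Int := missing.foldl (fun acc m =>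
      let mm := PySem.Str.lower m
      if PySem.Str.isIn "electric" mm then
        let acc := if (PySem.Str.isIn "_1" mm || PySem.Str.isIn "t1" mm || PySem.Str.endswith mm "1") then acc ++ [1] else acc
        let acc := if (PySem.Str.isIn "_2" mm || PySem.Str.isIn "t2" mm || PySem.Str.endswith mm "2") then acc ++ [2] else acc
        let acc := if (PySem.Str.isIn "_3" mm || PySem.Str.isIn "t3" mm || PySem.Str.endswith mm "3") then acc ++ [3] else acc
        acc
      else acc) []
    match PySem.List.min? candidates (fun x => x) with
    | some v => max 1 (min 3 v)
    | none => 1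

-- ===== PORT B =====
def pvScanTiers : List (Int × String × String × String) → List String → Int
  | [], _ => 1
  | (tier, under, tmark, suffix) :: rest, missing =>
    if missing.any (fun m =>
        let mm := PySem.Str.lower m
        PySem.Str.isIn "electric" mm &&
          (PySem.Str.isIn under mm || PySem.Str.isIn tmark mm || PySem.Str.endswith mm suffix))
    then tier else pvScanTiers rest missing

def choose_meter_index_from_missing_py_alt (missing : List String) : Int :=
  pvScanTiers [(1, "_1", "t1", "1"), (2, "_2", "t2", "2"), (3, "_3", "t3", "3")] missing

-- ===== PRECONDITION & SPEC =====
def Spec_choose_meter_index_from_missing_py (missing : List String) (out : Int) : Prop := out = choose_meter_index_from_missing_py_alt missing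
instance (missing : List String) (out : Int) : Decidable (Spec_choose_meter_index_from_missing_py missing out) := by unfold Spec_choose_meter_index_from_missing_py; infer_instance

-- ===== CLAIM (what is proved, stated in full; the proofs are below) =====
def Claim_equal_choose_meter_index_from_missing_py : Prop := ∀ (missing : List String), Dom_choose_meter_index_from_missing_py missing → Spec_choose_meter_index_from_missing_py missing (choose_meter_index_from_missing_py missing)

-- ===== LEMMAS AND PROOFS =====

/-- proof helper: the tier-k match predicate shared by both characterisations -/
def pvHit (under tmark suffix : String) (m : String) : Bool :=
  let mm := PySem.Str.lower m
  PySem.Str.isIn "electric" mm &&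
    (PySem.Str.isIn under mm || PySem.Str.isIn tmark mm || PySem.Str.endswith mm suffix)

/-- proof helper: the body of A's candidate-collecting loop, named -/
def pvStep (acc : List Int) (m : String) : List Int :=
  let mm := PySem.Str.lower m
  if PySem.Str.isIn "electric" mm then
    let acc := if (PySem.Str.isIn "_1" mm || PySem.Str.isIn "t1" mm || PySem.Str.endswith mm "1") then acc ++ [1] else acc
    let acc := if (PySem.Str.isIn "_2" mm || PySem.Str.isIn "t2" mm || PySem.Str.endswith mm "2") then acc ++ [2] else acc
    let acc := if (PySem.Str.isIn "_3" mm || PySem.Str.isIn "t3" mm || PySem.Str.endswith mm "3") then acc ++ [3] else acc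
    acc
  else acc

/-- proof helper: the candidates one field contributes -/
def pvCand (m : String) : List Int :=
  (if pvHit "_1" "t1" "1" m then [1] else []) ++
  (if pvHit "_2" "t2" "2" m then [2] else []) ++
  (if pvHit "_3" "t3" "3" m then [3] else [])

theorem pvStep_eq (acc : List Int) (m : String) : pvStep acc m = acc ++ pvCand m := by
  unfold pvStep pvCand pvHit
  cases hE : PySem.Str.isIn "electric" (PySem.Str.lower m) <;>
    cases hb1 : (PySem.Str.isIn "_1" (PySem.Str.lower m) || PySem.Str.isIn "t1" (PySem.Str.lower m) || PySem.Str.endswith (PySem.Str.lower m) "1") <;>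
    cases hb2 : (PySem.Str.isIn "_2" (PySem.Str.lower m) || PySem.Str.isIn "t2" (PySem.Str.lower m) || PySem.Str.endswith (PySem.Str.lower m) "2") <;>
    cases hb3 : (PySem.Str.isIn "_3" (PySem.Str.lower m) || PySem.Str.isIn "t3" (PySem.Str.lower m) || PySem.Str.endswith (PySem.Str.lower m) "3") <;>
    simp only [hE, hb1, hb2, hb3, Bool.and_true, Bool.and_false,
      if_true, if_false, Bool.false_eq_true, List.append_nil, List.nil_append,
      List.append_assoc]

theorem foldl_pvStep (missing : List String) (acc : List Int) :
    missing.foldl pvStep acc = acc ++ missing.flatMap pvCand := by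
  induction missing generalizing acc with
  | nil => simp
  | cons m t ih => rw [List.foldl_cons, pvStep_eq, ih, List.flatMap_cons, List.append_assoc]

theorem mem_pvCand (m : String) (x : Int) :
    x ∈ pvCand m ↔
      (x = 1 ∧ pvHit "_1" "t1" "1" m = true) ∨
      (x = 2 ∧ pvHit "_2" "t2" "2" m = true) ∨
      (x = 3 ∧ pvHit "_3" "t3" "3" m = true) := by
  unfold pvCand
  cases hp1 : pvHit "_1" "t1" "1" m <;> cases hp2 : pvHit "_2" "t2" "2" m <;>
    cases hp3 : pvHit "_3" "t3" "3" m <;>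
    simp only [List.mem_append, List.mem_singleton, List.not_mem_nil, if_true, if_false,
      Bool.false_eq_true, and_true, and_false, or_false, false_or, or_assoc]

theorem mem_flat (missing : List String) (x : Int) :
    x ∈ missing.flatMap pvCand ↔
      (x = 1 ∧ missing.any (fun m => pvHit "_1" "t1" "1" m)) ∨
      (x = 2 ∧ missing.any (fun m => pvHit "_2" "t2" "2" m)) ∨
      (x = 3 ∧ missing.any (fun m => pvHit "_3" "t3" "3" m)) := by
  rw [List.mem_flatMap]
  constructor
  · rintro ⟨m, hm, hx⟩
    rcases (mem_pvCand m x).1 hx with ⟨h, hp⟩ | ⟨h, hp⟩ | ⟨h, hp⟩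
    · exact Or.inl ⟨h, List.any_eq_true.2 ⟨m, hm, hp⟩⟩
    · exact Or.inr (Or.inl ⟨h, List.any_eq_true.2 ⟨m, hm, hp⟩⟩)
    · exact Or.inr (Or.inr ⟨h, List.any_eq_true.2 ⟨m, hm, hp⟩⟩)
  · rintro (⟨h, ha⟩ | ⟨h, ha⟩ | ⟨h, ha⟩) <;>
      obtain ⟨m, hm, hp⟩ := List.any_eq_true.1 ha
    · exact ⟨m, hm, (mem_pvCand m x).2 (Or.inl ⟨h, hp⟩)⟩
    · exact ⟨m, hm, (mem_pvCand m x).2 (Or.inr (Or.inl ⟨h, hp⟩))⟩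
    · exact ⟨m, hm, (mem_pvCand m x).2 (Or.inr (Or.inr ⟨h, hp⟩))⟩

theorem alt_eq (missing : List String) :
    choose_meter_index_from_missing_py_alt missing =
      if missing.any (fun m => pvHit "_1" "t1" "1" m) then 1
      else if missing.any (fun m => pvHit "_2" "t2" "2" m) then 2
      else if missing.any (fun m => pvHit "_3" "t3" "3" m) then 3
      else 1 := by
  unfold choose_meter_index_from_missing_py_alt
  cases H1 : missing.any (fun m => pvHit "_1" "t1" "1" m) <;>
    cases H2 : missing.any (fun m => pvHit "_2" "t2" "2" m) <;>
    cases H3 : missing.any (fun m => pvHit "_3" "t3" "3" m) <;>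
    simp only [pvHit] at H1 H2 H3 <;>
    simp only [pvScanTiers, H1, H2, H3, if_true, if_false, Bool.false_eq_true]

theorem choose_eq_alt (missing : List String) :
    choose_meter_index_from_missing_py missing = choose_meter_index_from_missing_py_alt missing := by
  rw [alt_eq]
  unfold choose_meter_index_from_missing_py
  have hfun : (fun (acc : List Int) (m : String) =>
      let mm := PySem.Str.lower m
      if PySem.Str.isIn "electric" mm then
        let acc := if (PySem.Str.isIn "_1" mm || PySem.Str.isIn "t1" mm || PySem.Str.endswith mm "1") then acc ++ [1] else acc
        let acc := if (PySem.Str.isIn "_2" mm || PySem.Str.isIn "t2" mm || PySem.Str.endswith mm "2") then acc ++ [2] else acc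
        let acc := if (PySem.Str.isIn "_3" mm || PySem.Str.isIn "t3" mm || PySem.Str.endswith mm "3") then acc ++ [3] else acc
        acc
      else acc) = pvStep := rfl
  by_cases hnil : missing = []
  · subst hnil; simp
  · simp only [if_neg hnil, hfun, foldl_pvStep, List.nil_append]
    have hmem := mem_flat missing
    rcases hmin : PySem.List.min? (missing.flatMap pvCand) (fun x => x) with _ | v
    · have hce : missing.flatMap pvCand = [] := (PySem.List.min?_eq_none_iff _ _).1 hmin
      have h1 : missing.any (fun m => pvHit "_1" "t1" "1" m) = false := by
        cases h : missing.any (fun m => pvHit "_1" "t1" "1" m)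
        · rfl
        · have := (hmem 1).2 (Or.inl ⟨rfl, h⟩); rw [hce] at this; simp at this
      have h2 : missing.any (fun m => pvHit "_2" "t2" "2" m) = false := by
        cases h : missing.any (fun m => pvHit "_2" "t2" "2" m)
        · rfl
        · have := (hmem 2).2 (Or.inr (Or.inl ⟨rfl, h⟩)); rw [hce] at this; simp at this
      have h3 : missing.any (fun m => pvHit "_3" "t3" "3" m) = false := by
        cases h : missing.any (fun m => pvHit "_3" "t3" "3" m)
        · rfl
        · have := (hmem 3).2 (Or.inr (Or.inr ⟨rfl, h⟩)); rw [hce] at this; simp at this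
      simp [h1, h2, h3]
    · have hv : v ∈ missing.flatMap pvCand := PySem.List.min?_mem hmin
      have hle : ∀ y ∈ missing.flatMap pvCand, v ≤ y := fun y hy => PySem.List.min?_isMin hmin y hy
      have no1 : missing.any (fun m => pvHit "_1" "t1" "1" m) = true → v ≤ 1 := fun h =>
        hle 1 ((hmem 1).2 (Or.inl ⟨rfl, h⟩))
      have no2 : missing.any (fun m => pvHit "_2" "t2" "2" m) = true → v ≤ 2 := fun h =>
        hle 2 ((hmem 2).2 (Or.inr (Or.inl ⟨rfl, h⟩)))
      rcases (hmem v).1 hv with ⟨hv1, h1⟩ | ⟨hv2, h2⟩ | ⟨hv3, h3⟩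
      · subst hv1; simp [h1]
      · subst hv2
        have h1 : missing.any (fun m => pvHit "_1" "t1" "1" m) = false := by
          cases h : missing.any (fun m => pvHit "_1" "t1" "1" m)
          · rfl
          · have := no1 h; omega
        simp [h1, h2]
      · subst hv3
        have h1 : missing.any (fun m => pvHit "_1" "t1" "1" m) = false := by
          cases h : missing.any (fun m => pvHit "_1" "t1" "1" m)
          · rfl
          · have := no1 h; omega
        have h2 : missing.any (fun m => pvHit "_2" "t2" "2" m) = false := by
          cases h : missing.any (fun m => pvHit "_2" "t2" "2" m)
          · rfl
          · have := no2 h; omega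
        simp [h1, h2, h3]

-- ===== VERDICT (by name: the statement is the Claim_ definition above) =====
theorem choose_meter_index_from_missing_py_spec : Claim_equal_choose_meter_index_from_missing_py := by
  intro missing _
  exact choose_eq_alt missing
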